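-- pv_equiv track=rewrite | github.com/pypi-data/pypi-mirror-252 | packages/Xponge/Xponge-1.4.4.tar.gz/Xponge-1.4.4/Xponge/assign/tpacm4/__init__.py | _get_type_distance
-- ===== SOURCE A (Python) =====
-- def _get_type_distance(s1, s2):
--     """ get the distance between two type strings """
--     if len(s1) != len(s2):
--         return 0
--     ans = 0
--     for i, s1i in enumerate(s1):
--         if i % 3 != 2 and s1i != s2[i]:
--             return 0
--         if i % 3 == 2 and s1i != s2[i]:
--             ans += 1
--     return ans
-- ===== SOURCE B (Python) =====
-- def _get_type_distance(s1, s2):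
--     """ get the distance between two type strings """
--     if len(s1) != len(s2):
--         return 0
--     ans = 0
--     n = len(s1)
--     j = 0
--     while j < n:
--         if s1[j] != s2[j] or (j + 1 < n and s1[j + 1] != s2[j + 1]):
--             return 0
--         if j + 2 < n and s1[j + 2] != s2[j + 2]:
--             ans += 1
--         j += 3
--     return ans
-- ===== Notes on version B (the rewrite author's own statement) =====
-- stated objective: alternative
-- what changed: Replaces A's per-character loop that tests i % 3 at every index by a stride-3 chunk loop that advances the index by 3, guarding the two leading positions of each chunk and counting a mismatch at the third, with no modulus arithmetic.
import Mathlib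
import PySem

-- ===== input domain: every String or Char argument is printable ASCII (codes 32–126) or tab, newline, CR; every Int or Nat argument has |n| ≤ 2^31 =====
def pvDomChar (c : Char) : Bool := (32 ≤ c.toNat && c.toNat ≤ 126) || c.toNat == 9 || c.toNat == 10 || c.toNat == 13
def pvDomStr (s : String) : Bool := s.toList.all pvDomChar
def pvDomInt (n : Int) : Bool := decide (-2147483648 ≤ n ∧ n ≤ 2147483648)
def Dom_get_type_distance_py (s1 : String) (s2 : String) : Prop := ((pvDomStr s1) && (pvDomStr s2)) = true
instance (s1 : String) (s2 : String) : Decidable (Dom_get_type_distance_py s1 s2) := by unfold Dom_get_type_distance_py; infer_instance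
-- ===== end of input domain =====

-- B replaces A's per-character loop with i % 3 tests by a stride-3 chunk loop
-- (guard the two leading positions of each chunk, count the third); objective: alternative.

-- ===== PORT A =====
-- A's loop: for i, s1i in enumerate(s1): …  (s2[i] via pyGet?; in range since lengths are equal)
def pvAloop (l2 : List Char) : List (Int × Char) → Int → Int
  | [], ans => ans
  | (i, c) :: rest, ans =>
    let d := (PySem.List.pyGet? l2 i).getD ' '   -- exact in range; out of range is unreachable (lengths equal)
    if i % 3 ≠ 2 ∧ c ≠ d then 0
    else pvAloop l2 rest (if i % 3 = 2 ∧ c ≠ d then ans + 1 else ans)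

def get_type_distance_py (s1 : String) (s2 : String) : Int :=
  if PySem.Str.len s1 ≠ PySem.Str.len s2 then 0
  else pvAloop s2.toList (PySem.List.enumerate s1.toList 0) 0

-- ===== PORT B =====
-- B's while-loop: index j stepping by 3 over both strings (s[j] as getElem?, in range by the guards)
def pvBloop (l1 l2 : List Char) (n j : Nat) (ans : Int) : Int :=
  if h : j < n then
    if l1[j]? ≠ l2[j]? ∨ (j + 1 < n ∧ l1[j + 1]? ≠ l2[j + 1]?) then 0
    else pvBloop l1 l2 n (j + 3) (if j + 2 < n ∧ l1[j + 2]? ≠ l2[j + 2]? then ans + 1 else ans)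
  else ans
  termination_by n - j
  decreasing_by omega

def get_type_distance_py_alt (s1 : String) (s2 : String) : Int :=
  if PySem.Str.len s1 ≠ PySem.Str.len s2 then 0
  else pvBloop s1.toList s2.toList s1.toList.length 0 0

-- ===== PRECONDITION & SPEC =====
def Spec_get_type_distance_py (s1 : String) (s2 : String) (out : Int) : Prop := out = get_type_distance_py_alt s1 s2
instance (s1 : String) (s2 : String) (out : Int) : Decidable (Spec_get_type_distance_py s1 s2 out) := by unfold Spec_get_type_distance_py; infer_instance

-- ===== CLAIM (what is proved, stated in full; the proofs are below) =====
def Claim_equal_get_type_distance_py : Prop := ∀ (s1 : String) (s2 : String), Dom_get_type_distance_py s1 s2 → Spec_get_type_distance_py s1 s2 (get_type_distance_py s1 s2)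

-- ===== LEMMAS AND PROOFS =====

-- Proof-only reference loop: A's loop re-expressed as a paired structural recursion with a Nat index.
def pvRef : Nat → List Char → List Char → Int → Int
  | _, [], _, ans => ans
  | _, _ :: _, [], ans => ans     -- unreachable: equal lengths
  | n, c :: cs, d :: ds, ans =>
    if n % 3 ≠ 2 ∧ c ≠ d then 0
    else pvRef (n + 1) cs ds (if n % 3 = 2 ∧ c ≠ d then ans + 1 else ans)

-- A's loop over enumerate equals pvRef on the matching suffix of l2.
theorem pvAloop_eq_ref (l2 : List Char) :
    ∀ (l1 : List Char) (n : Nat) (ans : Int), n + l1.length ≤ l2.length →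
      pvAloop l2 (PySem.List.enumerate l1 (n : Int)) ans = pvRef n l1 (l2.drop n) ans := by
  intro l1
  induction l1 with
  | nil => intro n ans _; simp [pvAloop, pvRef, PySem.List.enumerate]
  | cons c cs ih =>
    intro n ans hle
    have hn : n < l2.length := by simp at hle; omega
    rw [PySem.List.enumerate_cons, List.drop_eq_getElem_cons hn]
    rw [pvAloop, pvRef]
    simp only [PySem.List.pyGet?_natCast, List.getElem?_eq_getElem hn, Option.getD_some]
    rw [show (n : Int) + 1 = ((n + 1 : Nat) : Int) by push_cast; ring]
    rw [ih (n + 1) _ (by simp at hle ⊢; omega)]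
    simp only [show ((n : Int) % 3 = 2) ↔ (n % 3 = 2) from by omega, ne_eq]

-- pvRef on the suffixes from a chunk boundary equals B's chunk loop.
theorem pvRef_eq_pvBloop (l1 l2 : List Char) (hl : l1.length = l2.length) :
    ∀ (k j : Nat) (ans : Int), l1.length - j ≤ k → j % 3 = 0 →
      pvRef j (l1.drop j) (l2.drop j) ans = pvBloop l1 l2 l1.length j ans := by
  intro k
  induction k with
  | zero =>
    intro j ans hk _
    rw [List.drop_eq_nil_of_le (by omega), pvBloop, dif_neg (by omega : ¬ j < l1.length)]
    rfl
  | succ k ih =>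
    intro j ans hk hj
    by_cases hjn : j < l1.length
    · have hj2 : j < l2.length := by omega
      rw [pvBloop, dif_pos hjn]
      rw [List.drop_eq_getElem_cons hjn, List.drop_eq_getElem_cons hj2]
      simp only [pvRef]
      by_cases h0 : l1[j] = l2[j]
      · have g0 : l1[j]? = l2[j]? := by
          rw [List.getElem?_eq_getElem hjn, List.getElem?_eq_getElem hj2, h0]
        rw [if_neg (by simp [h0]), if_neg (by simp [h0])]
        by_cases h1n : j + 1 < l1.length
        · have h1n2 : j + 1 < l2.length := by omega
          rw [List.drop_eq_getElem_cons h1n, List.drop_eq_getElem_cons h1n2]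
          simp only [pvRef]
          by_cases h1 : l1[j + 1] = l2[j + 1]
          · have g1 : l1[j + 1]? = l2[j + 1]? := by
              rw [List.getElem?_eq_getElem h1n, List.getElem?_eq_getElem h1n2, h1]
            rw [if_neg (by simp [h1]), if_neg (by simp [h1])]
            rw [if_neg (by simp [g0, g1])]
            by_cases h2n : j + 2 < l1.length
            · have h2n2 : j + 2 < l2.length := by omega
              have hm2 : (j + 1 + 1) % 3 = 2 := by omega
              rw [List.drop_eq_getElem_cons h2n, List.drop_eq_getElem_cons h2n2]
              simp only [pvRef]
              rw [if_neg (by simp [show (j + 2) % 3 = 2 from by omega])]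
              rw [show j + 2 + 1 = j + 3 from by omega]
              rw [ih (j + 3) _ (by omega) (by omega)]
              have g2 : (¬ l1[j + 2]? = l2[j + 2]?) ↔ (¬ l1[j + 2] = l2[j + 2]) := by
                simp [List.getElem?_eq_getElem h2n, List.getElem?_eq_getElem h2n2]
              congr 1
              simp only [show (j + 2) % 3 = 2 from by omega, ne_eq, g2]
              simp [h2n]
            · rw [List.drop_eq_nil_of_le (by omega), List.drop_eq_nil_of_le (by omega)]
              simp only [pvRef]
              rw [pvBloop, dif_neg (by omega : ¬ j + 3 < l1.length)]
              rw [if_neg (by simp [h2n])]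
          · have g1 : ¬ l1[j + 1]? = l2[j + 1]? := by
              simp [List.getElem?_eq_getElem h1n, List.getElem?_eq_getElem h1n2, h1]
            rw [if_pos ⟨by omega, h1⟩, if_pos (Or.inr ⟨h1n, g1⟩)]
        · rw [List.drop_eq_nil_of_le (by omega), List.drop_eq_nil_of_le (by omega)]
          simp only [pvRef]
          rw [if_neg (by simp [g0, h1n])]
          rw [pvBloop, dif_neg (by omega : ¬ j + 3 < l1.length)]
          rw [if_neg (fun hc => absurd hc.1 (by omega))]
      · have g0 : ¬ l1[j]? = l2[j]? := by
          simp [List.getElem?_eq_getElem hjn, List.getElem?_eq_getElem hj2, h0]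
        rw [if_pos ⟨by omega, h0⟩, if_pos (Or.inl g0)]
    · rw [List.drop_eq_nil_of_le (by omega), pvBloop, dif_neg hjn]
      rfl

-- ===== VERDICT (by name: the statement is the Claim_ definition above) =====
theorem get_type_distance_py_spec : Claim_equal_get_type_distance_py := by
  unfold Claim_equal_get_type_distance_py Spec_get_type_distance_py
  intro s1 s2 _
  unfold get_type_distance_py get_type_distance_py_alt
  by_cases h : PySem.Str.len s1 = PySem.Str.len s2
  · have hq : ¬ (PySem.Str.len s1 ≠ PySem.Str.len s2) := fun hc => hc h
    rw [if_neg hq, if_neg hq]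
    have hl : s1.toList.length = s2.toList.length := by
      simp only [PySem.Str.len_eq] at h
      exact_mod_cast h
    have e1 := pvAloop_eq_ref s2.toList s1.toList 0 0 (by omega)
    have e2 := pvRef_eq_pvBloop s1.toList s2.toList hl (s1.toList.length) 0 0 (by omega) (by omega)
    simp only [List.drop_zero] at e1 e2
    exact e1.trans e2
  · rw [if_pos h, if_pos h]
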